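-- pv_equiv track=rewrite | github.com/ShihaoTan123/ner-industry | 02_prepare_scienceie.py | map_entities_to_local_token_spans
-- ===== SOURCE A (Python) =====
-- from typing import List, Tuple, Dict, Iterable
--
-- def map_entities_to_local_token_spans(
--     sent_tokens: List[str],
--     sent_tok_doc_spans: List[Tuple[int,int]],
--     ent_spans_doc: List[Tuple[int,int,str]],
--     sent_span: Tuple[int,int]
-- ) -> List[Tuple[int,int,str]]:
--     s_start, s_end = sent_span
--     cand = [(a,b,t) for (a,b,t) in ent_spans_doc if a >= s_start and b <= s_end and a < b]
--     mapped = []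
--     for a,b,t in cand:
--         st = None; ed = None
--         for i,(ta,tb) in enumerate(sent_tok_doc_spans):
--             if tb <= a:
--                 continue
--             if ta >= b:
--                 break
--             if ta < b and tb > a:
--                 if st is None:
--                     st = i
--                 ed = i
--         if st is not None and ed is not None and 0 <= st <= ed < len(sent_tokens):
--             mapped.append((st, ed, t))
--     mapped.sort(key=lambda x: (-(x[1]-x[0]+1), x[0], x[1]))
--     selected = []
--     used = [False]*len(sent_tokens)
--     for s,e,t in mapped:
--         if any(used[i] for i in range(s,e+1)):
--             continue
--         selected.append((s,e,t))
--         for i in range(s,e+1): used[i]=True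
--     selected.sort(key=lambda x: (x[0], x[1]))
--     return selected
-- ===== SOURCE B (Python) =====
-- def _advance(st, ed, done, a, b, i, ta, tb):
--     if done or tb <= a:
--         return st, ed, done
--     if ta >= b:
--         return st, ed, True
--     return (i if st is None else st), i, False
--
-- def _select(spans):
--     if not spans:
--         return []
--     s, e, t = spans[0]
--     return [spans[0]] + _select([y for y in spans[1:] if y[1] < s or e < y[0]])
--
-- def map_entities_to_local_token_spans(sent_tokens, sent_tok_doc_spans, ent_spans_doc, sent_span):
--     s_start, s_end = sent_span
--     n = len(sent_tokens)
--     cand = [(a, b, t) for (a, b, t) in ent_spans_doc if s_start <= a < b <= s_end]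
--     # token-major sweep: one pass over the token spans, updating every candidate's
--     # (first, last, done) state simultaneously
--     state = [(None, None, False)] * len(cand)
--     i = 0
--     for ta, tb in sent_tok_doc_spans:
--         state = [_advance(st, ed, done, a, b, i, ta, tb)
--                  for (st, ed, done), (a, b, _) in zip(state, cand)]
--         i += 1
--     mapped = [(st, ed, t) for (st, ed, done), (_, _, t) in zip(state, cand)
--               if st is not None and ed < n]
--     mapped.sort(key=lambda x: (-(x[1] - x[0] + 1), x[0], x[1]))
--     selected = _select(mapped)
--     selected.sort(key=lambda x: (x[0], x[1]))
--     return selected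
-- ===== Notes on version B (the rewrite author's own statement) =====
-- stated objective: alternative
-- what changed: B inverts the loop nesting: instead of A's entity-major nested scan (for each entity, walk the token spans with continue/break tracking st/ed), B makes a single token-major sweep that updates a (first,last,done) state for every candidate entity simultaneously, and it replaces A's greedy selection over a used-token boolean array by a recursive take-head-and-filter selection on the sorted list.
import Mathlib
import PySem

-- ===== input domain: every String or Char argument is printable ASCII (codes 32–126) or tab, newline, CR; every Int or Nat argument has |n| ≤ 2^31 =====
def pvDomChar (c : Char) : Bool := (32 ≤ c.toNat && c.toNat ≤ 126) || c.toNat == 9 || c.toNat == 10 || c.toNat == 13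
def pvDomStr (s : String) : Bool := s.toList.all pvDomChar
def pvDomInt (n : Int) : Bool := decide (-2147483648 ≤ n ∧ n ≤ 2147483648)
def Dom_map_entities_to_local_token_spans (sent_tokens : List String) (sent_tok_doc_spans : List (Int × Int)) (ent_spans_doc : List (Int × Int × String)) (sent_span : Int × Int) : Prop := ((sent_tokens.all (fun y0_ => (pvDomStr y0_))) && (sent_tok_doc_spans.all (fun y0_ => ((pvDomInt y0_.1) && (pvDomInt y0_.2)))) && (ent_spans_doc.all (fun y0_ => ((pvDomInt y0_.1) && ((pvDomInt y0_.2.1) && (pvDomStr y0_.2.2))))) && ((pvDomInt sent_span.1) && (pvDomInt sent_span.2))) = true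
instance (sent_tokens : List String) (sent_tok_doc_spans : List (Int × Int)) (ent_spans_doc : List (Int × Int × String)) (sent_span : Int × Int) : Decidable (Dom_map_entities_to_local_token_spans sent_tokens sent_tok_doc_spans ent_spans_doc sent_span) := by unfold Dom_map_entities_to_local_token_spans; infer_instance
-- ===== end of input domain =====

-- B inverts the loop nesting (one token-major sweep updating all candidate entities at once, instead of
-- A's per-entity token scan) and selects spans by recursive take-head-and-filter instead of A's
-- used-token boolean array (objective: alternative; same result).

-- shared sort machinery: both Pythons call list.sort with the same tuple keys (stable sort, lexicographic tuples)
def pvLt3 (x y : Int × Int × Int) : Bool :=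
  decide (x.1 < y.1) || (decide (x.1 = y.1) && (decide (x.2.1 < y.2.1) || (decide (x.2.1 = y.2.1) && decide (x.2.2 < y.2.2))))

def pvLt2 (x y : Int × Int) : Bool := decide (x.1 < y.1) || (decide (x.1 = y.1) && decide (x.2 < y.2))

def pvSortBy {α : Type} (lt : α → α → Bool) (xs : List α) : List α :=
  xs.foldl (fun acc x => PySem.List.insertBy lt x acc) []

def pvKey (x : Int × Int × String) : Int × Int × Int := (-(x.2.1 - x.1 + 1), x.1, x.2.1)

-- ===== PORT A =====
-- the inner token loop of A: continue / break / st-ed accumulators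
def pvScanA : List (Int × Int) → Int → Int → Int → Option Int → Option Int → Option Int × Option Int
  | [], _, _, _, st, ed => (st, ed)
  | tv :: rest, i, a, b, st, ed =>
    if tv.2 ≤ a then pvScanA rest (i+1) a b st ed
    else if b ≤ tv.1 then (st, ed)
    else if tv.1 < b ∧ a < tv.2 then
      pvScanA rest (i+1) a b (if st = none then some i else st) (some i)
    else pvScanA rest (i+1) a b st ed

def pvStepA (p : List (Int × Int × String) × List Bool) (x : Int × Int × String) :
    List (Int × Int × String) × List Bool :=
  if (PySem.List.pyRange x.1 (x.2.1 + 1) 1).any (fun i => PySem.List.pyGetD p.2 i false) then p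
  else (p.1 ++ [x], (PySem.List.pyRange x.1 (x.2.1 + 1) 1).foldl (fun u i => PySem.List.pySetD u i true) p.2)

def map_entities_to_local_token_spans (sent_tokens : List String) (sent_tok_doc_spans : List (Int × Int)) (ent_spans_doc : List (Int × Int × String)) (sent_span : Int × Int) : List (Int × Int × String) :=
  let s_start := sent_span.1
  let s_end := sent_span.2
  let cand := ent_spans_doc.filter (fun e => decide (s_start ≤ e.1) && decide (e.2.1 ≤ s_end) && decide (e.1 < e.2.1))
  let mapped := cand.foldl (fun acc e =>
    match pvScanA sent_tok_doc_spans 0 e.1 e.2.1 none none with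
    | (some s, some d) =>
        if 0 ≤ s ∧ s ≤ d ∧ d < (sent_tokens.length : Int) then acc ++ [(s, d, e.2.2)] else acc
    | _ => acc) []
  let mappedS := pvSortBy (fun x y => pvLt3 (pvKey x) (pvKey y)) mapped
  let sel := (mappedS.foldl pvStepA ([], List.replicate sent_tokens.length false)).1
  pvSortBy (fun x y => pvLt2 (x.1, x.2.1) (y.1, y.2.1)) sel

-- ===== PORT B =====
-- B's per-token state transition for one candidate entity (_advance in Source B)
def pvAdvance (st ed : Option Int) (done : Bool) (a b i ta tb : Int) : Option Int × Option Int × Bool :=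
  if done || decide (tb ≤ a) then (st, ed, done)
  else if b ≤ ta then (st, ed, true)
  else ((if st = none then some i else st), some i, false)

-- B's token-major sweep: one pass over the token spans, updating every candidate's state at once
def pvSweep : List (Int × Int) → Int → List ((Option Int × Option Int × Bool) × (Int × Int)) → List (Option Int × Option Int × Bool)
  | [], _, ps => ps.map (fun p => p.1)
  | tv :: rest, i, ps =>
      pvSweep rest (i + 1) (ps.map (fun p => (pvAdvance p.1.1 p.1.2.1 p.1.2.2 p.2.1 p.2.2 i tv.1 tv.2, p.2)))

-- B's recursive selection (_select in Source B): keep the head, drop everything overlapping it, recurse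
def pvSelect : List (Int × Int × String) → List (Int × Int × String)
  | [] => []
  | x :: rest => x :: pvSelect (rest.filter (fun y => decide (y.2.1 < x.1) || decide (x.2.1 < y.1)))
  termination_by l => l.length
  decreasing_by
    simp only [List.length_cons, Nat.lt_succ_iff, List.length_unattach]
    exact le_trans (List.length_filter_le _ _) (by simp)

def map_entities_to_local_token_spans_alt (sent_tokens : List String) (sent_tok_doc_spans : List (Int × Int)) (ent_spans_doc : List (Int × Int × String)) (sent_span : Int × Int) : List (Int × Int × String) :=
  let s_start := sent_span.1
  let s_end := sent_span.2
  let n : Int := sent_tokens.length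
  let cand := ent_spans_doc.filter (fun e => decide (s_start ≤ e.1) && decide (e.1 < e.2.1) && decide (e.2.1 ≤ s_end))
  let state := pvSweep sent_tok_doc_spans 0 (cand.map (fun e => ((none, none, false), (e.1, e.2.1))))
  let mapped := (state.zip cand).filterMap (fun p =>
    match p.1.1 with
    | none => none
    | some s =>
      match p.1.2.1 with
      | none => none
      | some d => if d < n then some (s, d, p.2.2.2) else none)
  let mappedS := pvSortBy (fun x y => pvLt3 (pvKey x) (pvKey y)) mapped
  let sel := pvSelect mappedS
  pvSortBy (fun x y => pvLt2 (x.1, x.2.1) (y.1, y.2.1)) sel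

-- ===== PRECONDITION & SPEC =====
def Spec_map_entities_to_local_token_spans (sent_tokens : List String) (sent_tok_doc_spans : List (Int × Int)) (ent_spans_doc : List (Int × Int × String)) (sent_span : Int × Int) (out : List (Int × Int × String)) : Prop := out = map_entities_to_local_token_spans_alt sent_tokens sent_tok_doc_spans ent_spans_doc sent_span
instance (sent_tokens : List String) (sent_tok_doc_spans : List (Int × Int)) (ent_spans_doc : List (Int × Int × String)) (sent_span : Int × Int) (out : List (Int × Int × String)) : Decidable (Spec_map_entities_to_local_token_spans sent_tokens sent_tok_doc_spans ent_spans_doc sent_span out) := by unfold Spec_map_entities_to_local_token_spans; infer_instance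

-- ===== CLAIM (what is proved, stated in full; the proofs are below) =====
def Claim_equal_map_entities_to_local_token_spans : Prop := ∀ (sent_tokens : List String) (sent_tok_doc_spans : List (Int × Int)) (ent_spans_doc : List (Int × Int × String)) (sent_span : Int × Int), Dom_map_entities_to_local_token_spans sent_tokens sent_tok_doc_spans ent_spans_doc sent_span → Spec_map_entities_to_local_token_spans sent_tokens sent_tok_doc_spans ent_spans_doc sent_span (map_entities_to_local_token_spans sent_tokens sent_tok_doc_spans ent_spans_doc sent_span)

-- ===== LEMMAS AND PROOFS =====

-- per-entity reading of the token-major sweep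
def pvEnt : List (Int × Int) → Int → (Int × Int) → (Option Int × Option Int × Bool) → Option Int × Option Int × Bool
  | [], _, _, s => s
  | tv :: rest, i, ab, s => pvEnt rest (i+1) ab (pvAdvance s.1 s.2.1 s.2.2 ab.1 ab.2 i tv.1 tv.2)

-- the optional-value view of A's per-entity mapping step
def pvFA (toks : List (Int × Int)) (n : Int) (e : Int × Int × String) : Option (Int × Int × String) :=
  match pvScanA toks 0 e.1 e.2.1 none none with
  | (some s, some d) => if 0 ≤ s ∧ s ≤ d ∧ d < n then some (s, d, e.2.2) else none
  | _ => none

-- accumulator form of B's greedy selection, used as a bridge between A's used-array fold and pvSelect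
def pvStepB (sel : List (Int × Int × String)) (x : Int × Int × String) : List (Int × Int × String) :=
  if sel.all (fun y => decide (x.2.1 < y.1) || decide (y.2.1 < x.1)) then sel ++ [x] else sel

-- in-bounds property of every mapped span (n = number of sentence tokens)
def pvInB (n : Int) (y : Int × Int × String) : Prop := 0 ≤ y.1 ∧ y.1 ≤ y.2.1 ∧ y.2.1 < n

-- coverage array maintained by A's greedy loop, expressed from the selected list
def pvUsedOf (n : Nat) (sel : List (Int × Int × String)) : List Bool :=
  (PySem.List.pyRange 0 n 1).map (fun j => sel.any (fun y => decide (y.1 ≤ j) && decide (j ≤ y.2.1)))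

theorem pvSweep_eq (toks : List (Int × Int)) :
    ∀ (i : Int) (ps : List ((Option Int × Option Int × Bool) × (Int × Int))),
    pvSweep toks i ps = ps.map (fun p => pvEnt toks i p.2 p.1) := by
  induction toks with
  | nil => intro i ps; rfl
  | cons tv rest ih =>
    intro i ps
    simp only [pvSweep, ih, List.map_map]
    rfl

theorem pvEnt_done (toks : List (Int × Int)) :
    ∀ (i : Int) (ab : Int × Int) (st ed : Option Int),
    pvEnt toks i ab (st, ed, true) = (st, ed, true) := by
  induction toks with
  | nil => intro i ab st ed; rfl
  | cons tv rest ih =>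
    intro i ab st ed
    simp only [pvEnt, pvAdvance, Bool.true_or, if_pos]
    exact ih (i+1) ab st ed

theorem pvEnt_scan (toks : List (Int × Int)) :
    ∀ (i a b : Int) (st ed : Option Int),
    ((pvEnt toks i (a, b) (st, ed, false)).1, (pvEnt toks i (a, b) (st, ed, false)).2.1)
      = pvScanA toks i a b st ed := by
  induction toks with
  | nil => intro i a b st ed; rfl
  | cons tv rest ih =>
    intro i a b st ed
    simp only [pvEnt, pvScanA, pvAdvance, Bool.false_or]
    by_cases h1 : tv.2 ≤ a
    · rw [if_pos h1, if_pos (by simpa using h1)]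
      exact ih (i+1) a b st ed
    · rw [if_neg h1, if_neg (by simpa using h1)]
      by_cases h2 : b ≤ tv.1
      · rw [if_pos h2, if_pos h2]
        rw [pvEnt_done]
      · rw [if_neg h2, if_neg h2, if_pos (⟨by omega, by omega⟩ : tv.1 < b ∧ a < tv.2)]
        exact ih (i+1) a b _ _

theorem pvScanA_keep (toks : List (Int × Int)) :
    ∀ (i a b s d : Int), ∃ d', pvScanA toks i a b (some s) (some d) = (some s, some d')
      ∧ (d' = d ∨ i ≤ d') := by
  induction toks with
  | nil => intro i a b s d; exact ⟨d, rfl, Or.inl rfl⟩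
  | cons tv rest ih =>
    intro i a b s d
    simp only [pvScanA]
    by_cases h1 : tv.2 ≤ a
    · rw [if_pos h1]
      obtain ⟨d', h, hd⟩ := ih (i+1) a b s d
      exact ⟨d', h, by omega⟩
    · rw [if_neg h1]
      by_cases h2 : b ≤ tv.1
      · rw [if_pos h2]; exact ⟨d, rfl, Or.inl rfl⟩
      · rw [if_neg h2, if_pos (⟨by omega, by omega⟩ : tv.1 < b ∧ a < tv.2)]
        have hst : (if (some s : Option Int) = none then some i else some s) = some s := by simp
        rw [hst]
        obtain ⟨d', h, hd⟩ := ih (i+1) a b s i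
        exact ⟨d', h, by omega⟩

theorem pvScanA_bounds (toks : List (Int × Int)) :
    ∀ (i a b s d : Int), pvScanA toks i a b none none = (some s, some d) → i ≤ s ∧ s ≤ d := by
  induction toks with
  | nil => intro i a b s d h; simp [pvScanA] at h
  | cons tv rest ih =>
    intro i a b s d h
    simp only [pvScanA] at h
    by_cases h1 : tv.2 ≤ a
    · rw [if_pos h1] at h
      have := ih (i+1) a b s d h; omega
    · rw [if_neg h1] at h
      by_cases h2 : b ≤ tv.1
      · rw [if_pos h2] at h; simp at h
      · rw [if_neg h2, if_pos (⟨by omega, by omega⟩ : tv.1 < b ∧ a < tv.2)] at h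
        simp at h
        obtain ⟨d', h', hd⟩ := pvScanA_keep rest (i+1) a b i i
        rw [h'] at h
        have hs : s = i := by
          have := congrArg Prod.fst h; simpa using this.symm
        have hdd : d = d' := by
          have := congrArg Prod.snd h; simpa using this.symm
        omega

-- A's append-fold over the candidates as a filterMap
theorem pvFoldOpt {α β : Type} (f : α → Option β) (l : List α) :
    ∀ acc, l.foldl (fun acc x => acc ++ (f x).toList) acc = acc ++ l.filterMap f := by
  induction l with
  | nil => intro acc; simp
  | cons x rest ih =>
    intro acc
    simp only [List.foldl_cons, List.filterMap_cons]
    cases hfx : f x with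
    | none => simp [ih]
    | some y => simp [ih, List.append_assoc]

theorem pvZipMapFilterMap {α σ β : Type} (l : List α) (g : α → σ) (F : σ × α → Option β) :
    ((l.map g).zip l).filterMap F = l.filterMap (fun e => F (g e, e)) := by
  induction l with
  | nil => rfl
  | cons x rest ih => simp only [List.map_cons, List.zip_cons_cons, List.filterMap_cons, ih]

theorem mem_pvSortBy {α : Type} (lt : α → α → Bool) (xs : List α) (y : α) :
    y ∈ pvSortBy lt xs ↔ y ∈ xs := by
  suffices h : ∀ acc, y ∈ xs.foldl (fun acc x => PySem.List.insertBy lt x acc) acc ↔ y ∈ xs ∨ y ∈ acc by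
    simpa [pvSortBy] using h []
  induction xs with
  | nil => simp
  | cons x rest ih =>
    intro acc
    simp only [List.foldl_cons, ih, PySem.List.mem_insertBy, List.mem_cons]
    tauto

theorem pvUsedOf_length (n : Nat) (sel : List (Int × Int × String)) :
    (pvUsedOf n sel).length = n := by
  simp [pvUsedOf, PySem.List.length_pyRange_one]

theorem pvUsedOf_nil (n : Nat) : pvUsedOf n [] = List.replicate n false := by
  simp [pvUsedOf, PySem.List.length_pyRange_one]

theorem pvUsedOf_getD (n : Nat) (sel : List (Int × Int × String)) (i : Int)
    (h0 : 0 ≤ i) (hn : i < (n : Int)) :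
    PySem.List.pyGetD (pvUsedOf n sel) i false
      = sel.any (fun y => decide (y.1 ≤ i) && decide (i ≤ y.2.1)) := by
  rw [PySem.List.pyGetD_eq_getElem (pvUsedOf n sel) false h0 (by rw [pvUsedOf_length]; omega)]
  simp only [pvUsedOf, List.getElem_map, PySem.List.getElem_pyRange_one]
  rw [zero_add, Int.toNat_of_nonneg h0]

theorem pvSetRange_length (l : List Int) (u : List Bool) :
    (l.foldl (fun u i => PySem.List.pySetD u i true) u).length = u.length := by
  induction l generalizing u with
  | nil => rfl
  | cons i rest ih => simp only [List.foldl_cons, ih, PySem.List.length_pySetD]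

theorem pvSetRange_getD (k : Nat) : ∀ (u : List Bool) (s t : Int), (t - s).toNat = k →
    0 ≤ s → t ≤ (u.length : Int) → ∀ j : Nat,
    ((PySem.List.pyRange s t 1).foldl (fun u i => PySem.List.pySetD u i true) u).getD j false
      = (u.getD j false || decide (s ≤ (j : Int) ∧ (j : Int) < t)) := by
  induction k with
  | zero =>
    intro u s t hk hs ht j
    rw [PySem.List.pyRange_one_eq_nil (by omega)]
    simp only [List.foldl_nil]
    have : ¬ (s ≤ (j:Int) ∧ (j:Int) < t) := by omega
    simp [this]
  | succ k ih =>
    intro u s t hk hs ht j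
    rw [PySem.List.pyRange_one_cons (by omega), List.foldl_cons]
    rw [ih (PySem.List.pySetD u s true) (s+1) t (by omega) (by omega)
        (by rw [PySem.List.length_pySetD]; omega)]
    rw [PySem.List.pySetD_of_nonneg u true hs]
    have hsl : s.toNat < u.length := by omega
    by_cases hj : j = s.toNat
    · subst hj
      have h1 : (u.set s.toNat true).getD s.toNat false = true := by
        simp [List.getD, hsl]
      rw [h1]
      have h2 : decide (s ≤ (s.toNat:Int) ∧ (s.toNat:Int) < t) = true := by
        rw [decide_eq_true_eq]; omega
      rw [h2]
      simp
    · have h1 : (u.set s.toNat true).getD j false = u.getD j false := by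
        simp [List.getD, (Ne.symm hj)]
      rw [h1]
      have h2 : decide (s+1 ≤ (j:Int) ∧ (j:Int) < t) = decide (s ≤ (j:Int) ∧ (j:Int) < t) :=
        decide_eq_decide.mpr (by omega)
      rw [h2]

theorem pvUsedOf_step (n : Nat) (sel : List (Int × Int × String)) (x : Int × Int × String)
    (hx : pvInB (n : Int) x) :
    (PySem.List.pyRange x.1 (x.2.1 + 1) 1).foldl (fun u i => PySem.List.pySetD u i true) (pvUsedOf n sel)
      = pvUsedOf n (sel ++ [x]) := by
  obtain ⟨hx1, hx2, hx3⟩ := hx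
  apply List.ext_getElem
  · rw [pvSetRange_length, pvUsedOf_length, pvUsedOf_length]
  · intro j hj1 hj2
    rw [pvSetRange_length, pvUsedOf_length] at hj1
    rw [← List.getD_eq_getElem _ false, ← List.getD_eq_getElem _ false]
    rw [pvSetRange_getD ((x.2.1 + 1) - x.1).toNat (pvUsedOf n sel) x.1 (x.2.1+1) rfl hx1
        (by rw [pvUsedOf_length]; omega)]
    have hgj : ∀ (s : List (Int × Int × String)), (pvUsedOf n s).getD j false
        = s.any (fun y => decide (y.1 ≤ (j:Int)) && decide ((j:Int) ≤ y.2.1)) := by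
      intro s
      have := pvUsedOf_getD n s (j:Int) (by omega) (by omega)
      rwa [PySem.List.pyGetD_natCast] at this
    rw [hgj, hgj]
    simp only [List.any_append, List.any_cons, List.any_nil, Bool.or_false]
    have h2 : decide (x.1 ≤ (j:Int) ∧ (j:Int) < x.2.1 + 1)
        = decide (x.1 ≤ (j:Int) ∧ (j:Int) ≤ x.2.1) := decide_eq_decide.mpr (by omega)
    rw [h2, Bool.decide_and]

theorem pvGuard_eq (n : Nat) (sel : List (Int × Int × String)) (x : Int × Int × String)
    (hx : pvInB (n : Int) x) (hsel : ∀ y ∈ sel, pvInB (n : Int) y) :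
    ((PySem.List.pyRange x.1 (x.2.1 + 1) 1).any (fun i => PySem.List.pyGetD (pvUsedOf n sel) i false))
      = !(sel.all (fun y => decide (x.2.1 < y.1) || decide (y.2.1 < x.1))) := by
  obtain ⟨hx1, hx2, hx3⟩ := hx
  cases hall : sel.all (fun y => decide (x.2.1 < y.1) || decide (y.2.1 < x.1)) with
  | true =>
    simp only [Bool.not_true]
    rw [List.any_eq_false]
    intro i hi
    rw [PySem.List.mem_pyRange_one] at hi
    rw [pvUsedOf_getD n sel i (by omega) (by omega)]
    rw [Bool.not_eq_true, List.any_eq_false]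
    intro y hy
    have := (List.all_eq_true.mp hall) y hy
    simp only [Bool.or_eq_true, decide_eq_true_eq] at this
    simp only [Bool.and_eq_true, decide_eq_true_eq, not_and]
    intro h1 h2
    omega
  | false =>
    simp only [Bool.not_false]
    rw [List.any_eq_true]
    obtain ⟨y, hy, hyv⟩ := List.all_eq_false.mp hall
    simp only [Bool.or_eq_true, decide_eq_true_eq, not_or, not_lt] at hyv
    obtain ⟨hy1, hy2, hy3⟩ := hsel y hy
    refine ⟨max x.1 y.1, ?_, ?_⟩
    · rw [PySem.List.mem_pyRange_one]; omega
    · rw [pvUsedOf_getD n sel _ (by omega) (by omega)]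
      rw [List.any_eq_true]
      exact ⟨y, hy, by simp only [Bool.and_eq_true, decide_eq_true_eq]; omega⟩

theorem pvSel_eq (n : Nat) (ms : List (Int × Int × String)) :
    ∀ (sel : List (Int × Int × String)) (used : List Bool), used = pvUsedOf n sel →
    (∀ y ∈ sel, pvInB (n : Int) y) → (∀ y ∈ ms, pvInB (n : Int) y) →
    (ms.foldl pvStepA (sel, used)).1 = ms.foldl pvStepB sel := by
  induction ms with
  | nil => intro sel used _ _ _; rfl
  | cons x rest ih =>
    intro sel used hu hsel hms
    have hx := hms x (List.mem_cons_self ..)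
    subst hu
    simp only [List.foldl_cons, pvStepA, pvStepB]
    rw [pvGuard_eq n sel x hx hsel]
    cases hall : sel.all (fun y => decide (x.2.1 < y.1) || decide (y.2.1 < x.1)) with
    | true =>
      simp only [Bool.not_true, Bool.false_eq_true, if_false, if_true]
      rw [pvUsedOf_step n sel x hx]
      exact ih (sel ++ [x]) _ rfl
        (fun y hy => by
          rcases List.mem_append.mp hy with h | h
          · exact hsel y h
          · rw [List.mem_singleton.mp h]; exact hx)
        (fun y hy => hms y (List.mem_cons_of_mem _ hy))
    | false =>
      simp only [Bool.not_false, if_true]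
      exact ih sel _ rfl hsel (fun y hy => hms y (List.mem_cons_of_mem _ hy))

-- the accumulator fold of pvStepB computes pvSelect
theorem pvFoldB_select (l : List (Int × Int × String)) :
    ∀ sel, l.foldl pvStepB sel
      = sel ++ pvSelect (l.filter (fun y => sel.all (fun z => decide (y.2.1 < z.1) || decide (z.2.1 < y.1)))) := by
  induction l with
  | nil =>
    intro sel
    simp only [List.foldl_nil, List.filter_nil]
    rw [pvSelect]
    simp
  | cons x rest ih =>
    intro sel
    simp only [List.foldl_cons, List.filter_cons, pvStepB]
    by_cases hg : (sel.all (fun y => decide (x.2.1 < y.1) || decide (y.2.1 < x.1))) = true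
    · rw [if_pos hg, if_pos hg, ih (sel ++ [x])]
      rw [pvSelect]
      have hff : rest.filter (fun y => (sel ++ [x]).all (fun z => decide (y.2.1 < z.1) || decide (z.2.1 < y.1)))
          = (rest.filter (fun y => sel.all (fun z => decide (y.2.1 < z.1) || decide (z.2.1 < y.1)))).filter
              (fun y => decide (y.2.1 < x.1) || decide (x.2.1 < y.1)) := by
        rw [List.filter_filter]
        apply List.filter_congr
        intro y _
        simp only [List.all_append, List.all_cons, List.all_nil, Bool.and_true]
        first | rfl | rw [Bool.and_comm]
      rw [hff]
      simp [List.append_assoc]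
    · rw [if_neg hg, if_neg hg]
      exact ih sel

-- pointwise agreement of the two per-entity mapping steps
theorem pvFA_eq_FB (toks : List (Int × Int)) (n : Int) (e : Int × Int × String) :
    pvFA toks n e
      = (match (pvEnt toks 0 (e.1, e.2.1) (none, none, false)).1 with
         | none => none
         | some s =>
           match (pvEnt toks 0 (e.1, e.2.1) (none, none, false)).2.1 with
           | none => none
           | some d => if d < n then some (s, d, e.2.2) else none) := by
  have hrel := pvEnt_scan toks 0 e.1 e.2.1 none none
  rcases hsc : pvScanA toks 0 e.1 e.2.1 none none with ⟨o1, o2⟩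
  rw [hsc] at hrel
  have h1 : (pvEnt toks 0 (e.1, e.2.1) (none, none, false)).1 = o1 := congrArg Prod.fst hrel
  have h2 : (pvEnt toks 0 (e.1, e.2.1) (none, none, false)).2.1 = o2 := congrArg Prod.snd hrel
  rw [h1, h2]
  unfold pvFA
  rw [hsc]
  cases o1 with
  | none => cases o2 <;> rfl
  | some s =>
    cases o2 with
    | none => rfl
    | some d =>
      have hb := pvScanA_bounds toks 0 e.1 e.2.1 s d hsc
      simp only []
      by_cases hd : d < n
      · rw [if_pos ⟨by omega, by omega, hd⟩, if_pos hd]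
      · rw [if_neg (by omega), if_neg hd]

-- membership in the mapped list gives in-bounds spans
theorem pvMem_filterMap_inB (toks : List (Int × Int)) (n : Int) (cand : List (Int × Int × String))
    (y : Int × Int × String) (hy : y ∈ cand.filterMap (pvFA toks n)) : pvInB n y := by
  obtain ⟨e, _, he⟩ := List.mem_filterMap.mp hy
  unfold pvFA at he
  rcases hsc : pvScanA toks 0 e.1 e.2.1 none none with ⟨o1, o2⟩
  rw [hsc] at he
  cases o1 with
  | none => cases o2 <;> simp at he
  | some s =>
    cases o2 with
    | none => simp at he
    | some d =>
      simp only [] at he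
      split_ifs at he with hc
      cases Option.some_inj.mp he
      exact ⟨hc.1, hc.2.1, hc.2.2⟩

-- ===== VERDICT (by name: the statement is the Claim_ definition above) =====
theorem map_entities_to_local_token_spans_spec : Claim_equal_map_entities_to_local_token_spans := by
  intro sent_tokens sent_tok_doc_spans ent_spans_doc sent_span _
  unfold Spec_map_entities_to_local_token_spans
  unfold map_entities_to_local_token_spans map_entities_to_local_token_spans_alt
  dsimp only []
  -- the two candidate filters agree
  have hcand : ent_spans_doc.filter (fun e => decide (sent_span.1 ≤ e.1) && decide (e.2.1 ≤ sent_span.2) && decide (e.1 < e.2.1))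
      = ent_spans_doc.filter (fun e => decide (sent_span.1 ≤ e.1) && decide (e.1 < e.2.1) && decide (e.2.1 ≤ sent_span.2)) := by
    apply List.filter_congr
    intro e _
    by_cases h1 : sent_span.1 ≤ e.1 <;> by_cases h2 : e.2.1 ≤ sent_span.2 <;>
      by_cases h3 : e.1 < e.2.1 <;> simp [h1, h2, h3]
  set candB := ent_spans_doc.filter (fun e => decide (sent_span.1 ≤ e.1) && decide (e.1 < e.2.1) && decide (e.2.1 ≤ sent_span.2)) with hcandB
  -- A's mapped list as a filterMap
  have hA : (ent_spans_doc.filter (fun e => decide (sent_span.1 ≤ e.1) && decide (e.2.1 ≤ sent_span.2) && decide (e.1 < e.2.1))).foldl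
      (fun acc e =>
        match pvScanA sent_tok_doc_spans 0 e.1 e.2.1 none none with
        | (some s, some d) =>
            if 0 ≤ s ∧ s ≤ d ∧ d < (sent_tokens.length : Int) then acc ++ [(s, d, e.2.2)] else acc
        | _ => acc) []
      = candB.filterMap (pvFA sent_tok_doc_spans (sent_tokens.length : Int)) := by
    rw [hcand]
    have hbody : (fun (acc : List (Int × Int × String)) (e : Int × Int × String) =>
        match pvScanA sent_tok_doc_spans 0 e.1 e.2.1 none none with
        | (some s, some d) =>
            if 0 ≤ s ∧ s ≤ d ∧ d < (sent_tokens.length : Int) then acc ++ [(s, d, e.2.2)] else acc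
        | _ => acc)
        = (fun acc e => acc ++ (pvFA sent_tok_doc_spans (sent_tokens.length : Int) e).toList) := by
      funext acc e
      unfold pvFA
      rcases pvScanA sent_tok_doc_spans 0 e.1 e.2.1 none none with ⟨o1, o2⟩
      cases o1 <;> cases o2 <;> simp only [Option.toList]
      · simp
      · simp
      · simp
      · split_ifs <;> simp
    rw [hbody, pvFoldOpt (pvFA sent_tok_doc_spans (sent_tokens.length : Int)) candB []]
    simp
  -- B's mapped list as the same filterMap
  have hB : ((pvSweep sent_tok_doc_spans 0 (candB.map (fun e => ((none, none, false), (e.1, e.2.1))))).zip candB).filterMap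
      (fun p => match p.1.1 with
        | none => none
        | some s =>
          match p.1.2.1 with
          | none => none
          | some d => if d < (sent_tokens.length : Int) then some (s, d, p.2.2.2) else none)
      = candB.filterMap (pvFA sent_tok_doc_spans (sent_tokens.length : Int)) := by
    rw [pvSweep_eq, List.map_map]
    have hcomp : ((fun (p : (Option Int × Option Int × Bool) × (Int × Int)) => pvEnt sent_tok_doc_spans 0 p.2 p.1) ∘
        (fun (e : Int × Int × String) => (((none : Option Int), (none : Option Int), false), (e.1, e.2.1))))
        = fun e => pvEnt sent_tok_doc_spans 0 (e.1, e.2.1) (none, none, false) := rfl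
    rw [hcomp, pvZipMapFilterMap]
    apply List.filterMap_congr
    intro e _
    exact (pvFA_eq_FB sent_tok_doc_spans (sent_tokens.length : Int) e).symm
  rw [hA, ← hB]
  apply congrArg
  set MS := pvSortBy (fun x y => pvLt3 (pvKey x) (pvKey y))
      (((pvSweep sent_tok_doc_spans 0 (candB.map (fun e => ((none, none, false), (e.1, e.2.1))))).zip candB).filterMap
        (fun p => match p.1.1 with
          | none => none
          | some s =>
            match p.1.2.1 with
            | none => none
            | some d => if d < (sent_tokens.length : Int) then some (s, d, p.2.2.2) else none)) with hMS
  have hmemMS : ∀ y ∈ MS, pvInB (sent_tokens.length : Int) y := by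
    intro y hy
    rw [hMS, mem_pvSortBy, hB] at hy
    exact pvMem_filterMap_inB _ _ _ y hy
  rw [← pvUsedOf_nil sent_tokens.length]
  rw [pvSel_eq sent_tokens.length MS [] _ rfl (by simp) hmemMS]
  rw [pvFoldB_select MS []]
  simp only [List.nil_append]
  congr 1
  apply List.filter_eq_self.mpr
  intro y _
  rfl
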